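-- pv_equiv track=rewrite | github.com/glygener/context_term_gst_tool | context_term_abstract_version/Scripts_Abstract/4_site_detector_tool.py | extract_site_sequence
-- ===== SOURCE A (Python) =====
-- def extract_site_sequence(type_dict_withOffset,senText,charStart,charEnd,typeName,typeSeqName):
--     extract_site_sequence_dict = {}
--     if typeName in type_dict_withOffset:
--         if len(type_dict_withOffset[typeName]) == 1:
--             return {}
--         else:
--             listOfType3 = type_dict_withOffset[typeName]
--             for i in range(len(listOfType3)):
--                 for j in range(len(listOfType3)):
--                     if i != j:
--                         sequenceText = listOfType3[i][0] + "-" + listOfType3[j][0]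
--                         if not senText.find(sequenceText) == -1 or listOfType3[j][1] == listOfType3[i][2]+1:
--                             # senIndex =
--                             siteSeqCharStart = listOfType3[i][1]
--                             siteSeqCharEnd = listOfType3[j][2]
--                             if typeSeqName in extract_site_sequence_dict:
--                                 extract_site_sequence_dict[typeSeqName].append((sequenceText,siteSeqCharStart,siteSeqCharEnd))
--                             else:
--                                 extract_site_sequence_dict[typeSeqName] = [(sequenceText,siteSeqCharStart,siteSeqCharEnd)]
--
--
--     return extract_site_sequence_dict
-- ===== SOURCE B (Python) =====
-- def extract_site_sequence(type_dict_withOffset, senText, charStart, charEnd, typeName, typeSeqName):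
--     if typeName not in type_dict_withOffset:
--         return {}
--     entries = type_dict_withOffset[typeName]
--     if len(entries) == 1:
--         return {}
--     # stage 1: bucket entry indices by term text and by start offset
--     by_term = {}
--     by_start = {}
--     for idx, (t, s, e) in enumerate(entries):
--         by_term.setdefault(t, []).append(idx)
--         by_start.setdefault(s, []).append(idx)
--     # stage 2: collect the accepted index pairs as a set --
--     # one substring search per ordered pair of DISTINCT term texts, expanded
--     # through the term buckets; adjacency by a hash join on start offsets
--     ok = set()
--     for a in by_term:
--         for b in by_term:
--             if senText.find(a + "-" + b) != -1:
--                 for i in by_term[a]: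
--                     for j in by_term[b]:
--                         if i != j:
--                             ok.add((i, j))
--     for i, (t, s, e) in enumerate(entries):
--         for j in by_start.get(e + 1, []):
--             if i != j:
--                 ok.add((i, j))
--     # stage 3: emit in ascending (i, j) order
--     pairs = [(entries[i][0] + "-" + entries[j][0], entries[i][1], entries[j][2])
--              for (i, j) in sorted(ok)]
--     return {typeSeqName: pairs} if pairs else {}
-- ===== Notes on version B (the rewrite author's own statement) =====
-- stated objective: alternative
-- what changed: B no longer tests each ordered entry pair directly: it buckets entry indices by term text and by start offset in one pass, computes the accepted index pairs as a SET (one substring search per ordered pair of distinct term texts expanded through the term buckets, plus a hash join on start offsets for adjacency), then sorts the set and emits; A grows a dict inside an n*n loop running one senText.find per pair.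
import Mathlib
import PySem

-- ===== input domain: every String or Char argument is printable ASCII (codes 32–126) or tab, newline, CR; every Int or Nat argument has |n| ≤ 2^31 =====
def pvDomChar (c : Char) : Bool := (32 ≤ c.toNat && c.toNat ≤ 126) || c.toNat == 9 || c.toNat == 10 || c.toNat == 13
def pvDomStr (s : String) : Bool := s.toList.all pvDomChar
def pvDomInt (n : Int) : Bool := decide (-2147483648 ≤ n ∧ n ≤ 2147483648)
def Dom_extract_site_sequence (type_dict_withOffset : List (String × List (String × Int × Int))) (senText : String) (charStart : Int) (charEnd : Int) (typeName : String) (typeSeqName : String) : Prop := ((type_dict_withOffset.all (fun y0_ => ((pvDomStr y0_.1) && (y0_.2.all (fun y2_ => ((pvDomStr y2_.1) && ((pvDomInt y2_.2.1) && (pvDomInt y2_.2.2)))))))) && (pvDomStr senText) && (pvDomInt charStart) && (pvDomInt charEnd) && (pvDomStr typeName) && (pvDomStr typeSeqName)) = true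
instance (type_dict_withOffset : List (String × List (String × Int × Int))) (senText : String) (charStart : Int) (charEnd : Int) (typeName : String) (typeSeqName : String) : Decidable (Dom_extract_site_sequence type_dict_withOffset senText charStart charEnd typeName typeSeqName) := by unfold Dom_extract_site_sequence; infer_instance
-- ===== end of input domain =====

-- B replaces A's per-entry-pair scan of senText with staged passes: bucket indices by term
-- text and by start offset, collect accepted index pairs as a set, sort, then emit
-- (objective: alternative algorithm; same return value on every input).

-- ===== PORT A =====
def extract_site_sequence (type_dict_withOffset : List (String × List (String × Int × Int))) (senText : String) (charStart : Int) (charEnd : Int) (typeName : String) (typeSeqName : String) : List (String × List (String × Int × Int)) :=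
  let d0 : PySem.Dict String (List (String × Int × Int)) := PySem.Dict.empty
  match (PySem.Dict.mk type_dict_withOffset).get? typeName with
  | none => d0.items
  | some listOfType3 =>
    if PySem.List.len listOfType3 = 1 then []
    else
      ((PySem.List.pyRange 0 (PySem.List.len listOfType3) 1).foldl (fun d i =>
        (PySem.List.pyRange 0 (PySem.List.len listOfType3) 1).foldl (fun d j =>
          if i ≠ j then
            if ¬ PySem.Str.find senText ((PySem.List.pyGetD listOfType3 i ("", 0, 0)).1 ++ "-" ++ (PySem.List.pyGetD listOfType3 j ("", 0, 0)).1) = -1 ∨ (PySem.List.pyGetD listOfType3 j ("", 0, 0)).2.1 = (PySem.List.pyGetD listOfType3 i ("", 0, 0)).2.2 + 1 then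
              if d.contains typeSeqName then
                d.modify typeSeqName [] (fun l => l ++ [((PySem.List.pyGetD listOfType3 i ("", 0, 0)).1 ++ "-" ++ (PySem.List.pyGetD listOfType3 j ("", 0, 0)).1, (PySem.List.pyGetD listOfType3 i ("", 0, 0)).2.1, (PySem.List.pyGetD listOfType3 j ("", 0, 0)).2.2)])
              else
                d.insert typeSeqName [((PySem.List.pyGetD listOfType3 i ("", 0, 0)).1 ++ "-" ++ (PySem.List.pyGetD listOfType3 j ("", 0, 0)).1, (PySem.List.pyGetD listOfType3 i ("", 0, 0)).2.1, (PySem.List.pyGetD listOfType3 j ("", 0, 0)).2.2)]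
            else d
          else d) d) d0).items

-- ===== PORT B =====
-- B-side helpers: Source B's local variables by_term / by_start / ok / pairs as named definitions
def pvByTerm (entries : List (String × Int × Int)) : PySem.Dict String (List Int) :=
  (PySem.List.enumerate entries).foldl (fun d p => d.modify p.2.1 [] (fun l => l ++ [p.1])) PySem.Dict.empty

def pvByStart (entries : List (String × Int × Int)) : PySem.Dict Int (List Int) :=
  (PySem.List.enumerate entries).foldl (fun d p => d.modify p.2.2.1 [] (fun l => l ++ [p.1])) PySem.Dict.empty

def pvOk (senText : String) (entries : List (String × Int × Int)) : PySem.Set (Int × Int) :=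
  (PySem.List.enumerate entries).foldl (fun s p =>
      ((pvByStart entries).getD (p.2.2.2 + 1) []).foldl (fun s j =>
        if p.1 ≠ j then PySem.Set.add s (p.1, j) else s) s)
    ((pvByTerm entries).keys.foldl (fun s a =>
      (pvByTerm entries).keys.foldl (fun s b =>
        if ¬ PySem.Str.find senText (a ++ "-" ++ b) = -1 then
          ((pvByTerm entries).getD a []).foldl (fun s i =>
            ((pvByTerm entries).getD b []).foldl (fun s j =>
              if i ≠ j then PySem.Set.add s (i, j) else s) s) s
        else s) s) PySem.Set.empty)

def pvPairsB (senText : String) (entries : List (String × Int × Int)) : List (String × Int × Int) :=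
  (PySem.List.sorted2 (pvOk senText entries) (fun ij => ij.1) (fun ij => ij.2)).map (fun ij =>
    ((PySem.List.pyGetD entries ij.1 ("", 0, 0)).1 ++ "-" ++ (PySem.List.pyGetD entries ij.2 ("", 0, 0)).1,
     (PySem.List.pyGetD entries ij.1 ("", 0, 0)).2.1, (PySem.List.pyGetD entries ij.2 ("", 0, 0)).2.2))

def extract_site_sequence_alt (type_dict_withOffset : List (String × List (String × Int × Int))) (senText : String) (charStart : Int) (charEnd : Int) (typeName : String) (typeSeqName : String) : List (String × List (String × Int × Int)) :=
  match (PySem.Dict.mk type_dict_withOffset).get? typeName with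
  | none => []
  | some entries =>
    if PySem.List.len entries = 1 then []
    else
      let pairs := pvPairsB senText entries
      if pairs = [] then [] else [(typeSeqName, pairs)]

-- ===== PRECONDITION & SPEC =====
def Spec_extract_site_sequence (type_dict_withOffset : List (String × List (String × Int × Int))) (senText : String) (charStart : Int) (charEnd : Int) (typeName : String) (typeSeqName : String) (out : List (String × List (String × Int × Int))) : Prop := out = extract_site_sequence_alt type_dict_withOffset senText charStart charEnd typeName typeSeqName
instance (type_dict_withOffset : List (String × List (String × Int × Int))) (senText : String) (charStart : Int) (charEnd : Int) (typeName : String) (typeSeqName : String) (out : List (String × List (String × Int × Int))) : Decidable (Spec_extract_site_sequence type_dict_withOffset senText charStart charEnd typeName typeSeqName out) := by unfold Spec_extract_site_sequence; infer_instance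

-- ===== CLAIM (what is proved, stated in full; the proofs are below) =====
def Claim_equal_extract_site_sequence : Prop := ∀ (type_dict_withOffset : List (String × List (String × Int × Int))) (senText : String) (charStart : Int) (charEnd : Int) (typeName : String) (typeSeqName : String), Dom_extract_site_sequence type_dict_withOffset senText charStart charEnd typeName typeSeqName → Spec_extract_site_sequence type_dict_withOffset senText charStart charEnd typeName typeSeqName (extract_site_sequence type_dict_withOffset senText charStart charEnd typeName typeSeqName)

-- ===== LEMMAS AND PROOFS =====

-- the accepted index pairs in A's emission order
def pvCanon (senText : String) (entries : List (String × Int × Int)) : List (Int × Int) :=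
  (PySem.List.enumerate entries).flatMap (fun p =>
    (PySem.List.enumerate entries).filterMap (fun q =>
      if (p.1 ≠ q.1 ∧ (¬ PySem.Str.find senText (p.2.1 ++ "-" ++ q.2.1) = -1 ∨ q.2.2.1 = p.2.2.2 + 1)) then some (p.1, q.1) else none))

-- abbreviation used only by the proofs below: A's conditional dict-append step
def pvPush (k : String) (d : PySem.Dict String (List (String × Int × Int))) (v : String × Int × Int) :
    PySem.Dict String (List (String × Int × Int)) :=
  if d.contains k then d.modify k [] (fun l => l ++ [v]) else d.insert k [v]

theorem pvPush_eq (k : String) (d : PySem.Dict String (List (String × Int × Int))) (v : String × Int × Int) :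
    (if d.contains k then d.modify k [] (fun l => l ++ [v]) else d.insert k [v]) = pvPush k d v := rfl

theorem pv_push_single (k : String) (vs : List (String × Int × Int)) (v : String × Int × Int) :
    pvPush k (PySem.Dict.mk [(k, vs)]) v = PySem.Dict.mk [(k, vs ++ [v])] := by
  simp [pvPush, PySem.Dict.contains, PySem.Dict.modify, PySem.Dict.get?, PySem.Dict.getD, PySem.Dict.insert]

theorem pv_push_empty (k : String) (v : String × Int × Int) :
    pvPush k PySem.Dict.empty v = PySem.Dict.mk [(k, [v])] := by
  simp [pvPush, PySem.Dict.contains, PySem.Dict.empty, PySem.Dict.insert]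

theorem pv_if_merge {σ : Type} (a b : Prop) [Decidable a] [Decidable b] (x d : σ) :
    (if a then (if b then x else d) else d) = if a ∧ b then x else d := by
  by_cases ha : a <;> by_cases hb : b <;> simp [ha, hb]

-- a conditional-append fold from a one-key dict appends the filterMapped elements
theorem pv_fold_single {α : Type} (k : String) (c : α → Prop) [DecidablePred c]
    (f : α → String × Int × Int) (L : List α) (vs : List (String × Int × Int)) :
    L.foldl (fun d q => if c q then pvPush k d (f q) else d) (PySem.Dict.mk [(k, vs)]) =
      PySem.Dict.mk [(k, vs ++ L.filterMap (fun q => if c q then some (f q) else none))] := by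
  induction L generalizing vs with
  | nil => simp
  | cons q L ih => by_cases hq : c q <;> simp [hq, pv_push_single, ih]

theorem pv_fold_empty {α : Type} (k : String) (c : α → Prop) [DecidablePred c]
    (f : α → String × Int × Int) (L : List α) :
    L.foldl (fun d q => if c q then pvPush k d (f q) else d) PySem.Dict.empty =
      (if L.filterMap (fun q => if c q then some (f q) else none) = [] then PySem.Dict.empty
       else PySem.Dict.mk [(k, L.filterMap (fun q => if c q then some (f q) else none))]) := by
  induction L with
  | nil => simp
  | cons q L ih =>
    by_cases hq : c q
    · simp [hq, pv_push_empty, pv_fold_single]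
    · simp [hq, ih]

-- closed form of the whole nested conditional-append loop, started from the empty dict
theorem pv_outer_fold_single {α β : Type} (k : String) (g : α → List β)
    (c : α → β → Prop) [∀ p, DecidablePred (c p)] (f : α → β → String × Int × Int)
    (L : List α) (vs : List (String × Int × Int)) :
    L.foldl (fun d p => (g p).foldl (fun d q => if c p q then pvPush k d (f p q) else d) d)
        (PySem.Dict.mk [(k, vs)]) =
      PySem.Dict.mk [(k, vs ++ L.flatMap (fun p => (g p).filterMap (fun q => if c p q then some (f p q) else none)))] := by
  induction L generalizing vs with
  | nil => simp
  | cons p L ih =>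
    simp only [List.foldl_cons, pv_fold_single, ih, List.flatMap_cons, List.append_assoc]

theorem pv_outer_fold_empty {α β : Type} (k : String) (g : α → List β)
    (c : α → β → Prop) [∀ p, DecidablePred (c p)] (f : α → β → String × Int × Int)
    (L : List α) :
    L.foldl (fun d p => (g p).foldl (fun d q => if c p q then pvPush k d (f p q) else d) d)
        PySem.Dict.empty =
      (if L.flatMap (fun p => (g p).filterMap (fun q => if c p q then some (f p q) else none)) = [] then PySem.Dict.empty
       else PySem.Dict.mk [(k, L.flatMap (fun p => (g p).filterMap (fun q => if c p q then some (f p q) else none)))]) := by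
  induction L with
  | nil => simp
  | cons p L ih =>
    simp only [List.foldl_cons, pv_fold_empty, List.flatMap_cons]
    by_cases hp : (g p).filterMap (fun q => if c p q then some (f p q) else none) = []
    · simp [hp, ih]
    · have hne : (g p).filterMap (fun q => if c p q then some (f p q) else none) ++
          L.flatMap (fun p => (g p).filterMap (fun q => if c p q then some (f p q) else none)) ≠ [] := by
        intro h; exact hp (List.append_eq_nil_iff.mp h).1
      rw [if_neg hp, if_neg hne, pv_outer_fold_single]

-- the two nested loops over index pairs are one loop over enumerated pairs
theorem pv_A_fold_eq_enum (senText typeSeqName : String) (entries : List (String × Int × Int)) :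
    ((PySem.List.pyRange 0 (PySem.List.len entries) 1).foldl (fun d i =>
        (PySem.List.pyRange 0 (PySem.List.len entries) 1).foldl (fun d j =>
          if i ≠ j then
            if ¬ PySem.Str.find senText ((PySem.List.pyGetD entries i ("", 0, 0)).1 ++ "-" ++ (PySem.List.pyGetD entries j ("", 0, 0)).1) = -1 ∨ (PySem.List.pyGetD entries j ("", 0, 0)).2.1 = (PySem.List.pyGetD entries i ("", 0, 0)).2.2 + 1 then
              pvPush typeSeqName d ((PySem.List.pyGetD entries i ("", 0, 0)).1 ++ "-" ++ (PySem.List.pyGetD entries j ("", 0, 0)).1, (PySem.List.pyGetD entries i ("", 0, 0)).2.1, (PySem.List.pyGetD entries j ("", 0, 0)).2.2)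
            else d
          else d) d) PySem.Dict.empty) =
    ((PySem.List.enumerate entries).foldl (fun d p =>
        (PySem.List.enumerate entries).foldl (fun d q =>
          if p.1 ≠ q.1 then
            if ¬ PySem.Str.find senText (p.2.1 ++ "-" ++ q.2.1) = -1 ∨ q.2.2.1 = p.2.2.2 + 1 then
              pvPush typeSeqName d (p.2.1 ++ "-" ++ q.2.1, p.2.2.1, q.2.2.2)
            else d
          else d) d) PySem.Dict.empty) := by
  simp only [PySem.List.enumerate_eq_map_pyRange entries (("", 0, 0) : String × Int × Int), List.foldl_map]

-- generic membership / nodup laws for accumulate-into-a-set folds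
theorem pv_mem_foldl {β γ : Type} (F : List γ → β → List γ) (P : β → γ → Prop)
    (h : ∀ s b x, x ∈ F s b ↔ P b x ∨ x ∈ s) (L : List β) (s0 : List γ) (x : γ) :
    x ∈ L.foldl F s0 ↔ (∃ b ∈ L, P b x) ∨ x ∈ s0 := by
  induction L generalizing s0 with
  | nil => simp
  | cons b L ih =>
    rw [List.foldl_cons, ih, h]
    constructor
    · rintro (⟨b', hb', hP⟩ | hP | hx)
      · exact Or.inl ⟨b', List.mem_cons_of_mem _ hb', hP⟩
      · exact Or.inl ⟨b, List.mem_cons_self, hP⟩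
      · exact Or.inr hx
    · rintro (⟨b', hb', hP⟩ | hx)
      · rcases List.mem_cons.mp hb' with rfl | hb'
        · exact Or.inr (Or.inl hP)
        · exact Or.inl ⟨b', hb', hP⟩
      · exact Or.inr (Or.inr hx)

theorem pv_nodup_foldl {β γ : Type} (F : List γ → β → List γ)
    (h : ∀ s b, s.Nodup → (F s b).Nodup) (L : List β) (s0 : List γ) (h0 : s0.Nodup) :
    (L.foldl F s0).Nodup := by
  induction L generalizing s0 with
  | nil => exact h0
  | cons b L ih => exact ih _ (h _ _ h0)

-- the term buckets: i is in by_term[a] iff entry i carries term a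
theorem pv_mem_bucket_term (entries : List (String × Int × Int)) (a : String) (i : Int) :
    i ∈ (pvByTerm entries).getD a [] ↔
      ∃ p ∈ PySem.List.enumerate entries, p.2.1 = a ∧ p.1 = i := by
  have h := PySem.Dict.getD_foldl_modify_append
      ((PySem.List.enumerate entries).map (fun p => (p.2.1, p.1)))
      (PySem.Dict.empty : PySem.Dict String (List Int)) a
  rw [List.foldl_map] at h
  unfold pvByTerm
  rw [h]
  simp only [PySem.Dict.getD_empty, List.nil_append, List.mem_map, List.mem_filter]
  constructor
  · rintro ⟨r, ⟨⟨p, hp, rfl⟩, hr⟩, rfl⟩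
    exact ⟨p, hp, by simpa using hr, rfl⟩
  · rintro ⟨p, hp, ha, hi⟩
    exact ⟨(p.2.1, p.1), ⟨⟨p, hp, rfl⟩, by simpa using ha⟩, hi⟩

theorem pv_mem_bucket_start (entries : List (String × Int × Int)) (c : Int) (j : Int) :
    j ∈ (pvByStart entries).getD c [] ↔
      ∃ q ∈ PySem.List.enumerate entries, q.2.2.1 = c ∧ q.1 = j := by
  have h := PySem.Dict.getD_foldl_modify_append
      ((PySem.List.enumerate entries).map (fun p => (p.2.2.1, p.1)))
      (PySem.Dict.empty : PySem.Dict Int (List Int)) c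
  rw [List.foldl_map] at h
  unfold pvByStart
  rw [h]
  simp only [PySem.Dict.getD_empty, List.nil_append, List.mem_map, List.mem_filter]
  constructor
  · rintro ⟨r, ⟨⟨p, hp, rfl⟩, hr⟩, rfl⟩
    exact ⟨p, hp, by simpa using hr, rfl⟩
  · rintro ⟨p, hp, ha, hi⟩
    exact ⟨(p.2.2.1, p.1), ⟨⟨p, hp, rfl⟩, by simpa using ha⟩, hi⟩

theorem pv_mem_keys_term (entries : List (String × Int × Int)) (a : String) :
    a ∈ (pvByTerm entries).keys ↔ ∃ p ∈ PySem.List.enumerate entries, p.2.1 = a := by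
  unfold pvByTerm
  rw [PySem.Dict.keys_foldl_modify_key (PySem.List.enumerate entries) (fun p => p.2.1) []
      (fun _ p => fun l => l ++ [p.1]) PySem.Dict.empty]
  simp [PySem.Set.mem_update, PySem.Dict.keys_empty, List.mem_map, eq_comm]

-- membership in B's set of accepted index pairs = A's acceptance condition
theorem pv_mem_ok (senText : String) (entries : List (String × Int × Int)) (x : Int × Int) :
    x ∈ pvOk senText entries ↔
      ∃ p ∈ PySem.List.enumerate entries, ∃ q ∈ PySem.List.enumerate entries,
        (p.1 ≠ q.1 ∧ (¬ PySem.Str.find senText (p.2.1 ++ "-" ++ q.2.1) = -1 ∨ q.2.2.1 = p.2.2.2 + 1)) ∧ x = (p.1, q.1) := by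
  have hadd : ∀ (i : Int) (J : List Int) (s : PySem.Set (Int × Int)) (x : Int × Int),
      x ∈ J.foldl (fun s j => if i ≠ j then PySem.Set.add s (i, j) else s) s ↔
        (∃ j ∈ J, i ≠ j ∧ x = (i, j)) ∨ x ∈ s := by
    intro i J s x
    refine pv_mem_foldl _ (fun j x => i ≠ j ∧ x = (i, j)) ?_ J s x
    intro s j x
    by_cases hij : i ≠ j
    · simp only [if_pos hij, PySem.Set.mem_add, hij, true_and]; tauto
    · simp [hij]
  have hsub : ∀ (a b : String) (s : PySem.Set (Int × Int)) (x : Int × Int),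
      x ∈ ((pvByTerm entries).getD a []).foldl (fun s i =>
            ((pvByTerm entries).getD b []).foldl (fun s j =>
              if i ≠ j then PySem.Set.add s (i, j) else s) s) s ↔
        (∃ i ∈ (pvByTerm entries).getD a [], ∃ j ∈ (pvByTerm entries).getD b [], i ≠ j ∧ x = (i, j)) ∨ x ∈ s := by
    intro a b s x
    exact pv_mem_foldl _ (fun i x => ∃ j ∈ (pvByTerm entries).getD b [], i ≠ j ∧ x = (i, j))
      (fun s i x => hadd i _ s x) _ s x
  have hkeyb : ∀ (a : String) (s : PySem.Set (Int × Int)) (x : Int × Int),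
      x ∈ (pvByTerm entries).keys.foldl (fun s b =>
            if ¬ PySem.Str.find senText (a ++ "-" ++ b) = -1 then
              ((pvByTerm entries).getD a []).foldl (fun s i =>
                ((pvByTerm entries).getD b []).foldl (fun s j =>
                  if i ≠ j then PySem.Set.add s (i, j) else s) s) s
            else s) s ↔
        (∃ b ∈ (pvByTerm entries).keys, (¬ PySem.Str.find senText (a ++ "-" ++ b) = -1) ∧
          ∃ i ∈ (pvByTerm entries).getD a [], ∃ j ∈ (pvByTerm entries).getD b [], i ≠ j ∧ x = (i, j)) ∨ x ∈ s := by
    intro a s x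
    refine pv_mem_foldl _ (fun b x => (¬ PySem.Str.find senText (a ++ "-" ++ b) = -1) ∧
      ∃ i ∈ (pvByTerm entries).getD a [], ∃ j ∈ (pvByTerm entries).getD b [], i ≠ j ∧ x = (i, j)) ?_ _ s x
    intro s b x
    by_cases hf : ¬ PySem.Str.find senText (a ++ "-" ++ b) = -1
    · rw [if_pos hf, hsub a b s x]
      show _ ↔ (¬ PySem.Str.find senText (a ++ "-" ++ b) = -1 ∧ _) ∨ _
      constructor
      · rintro (h | hx)
        · exact Or.inl ⟨hf, h⟩
        · exact Or.inr hx
      · rintro (⟨-, h⟩ | hx)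
        · exact Or.inl h
        · exact Or.inr hx
    · rw [if_neg hf]
      show _ ↔ (¬ PySem.Str.find senText (a ++ "-" ++ b) = -1 ∧ _) ∨ _
      have hf' : PySem.Str.find senText (a ++ "-" ++ b) = -1 := not_not.mp hf
      constructor
      · exact Or.inr
      · rintro (⟨hc, -⟩ | hx)
        · exact absurd hf' hc
        · exact hx
  have hok0 : ∀ (x : Int × Int),
      x ∈ (pvByTerm entries).keys.foldl (fun s a =>
            (pvByTerm entries).keys.foldl (fun s b =>
              if ¬ PySem.Str.find senText (a ++ "-" ++ b) = -1 then
                ((pvByTerm entries).getD a []).foldl (fun s i =>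
                  ((pvByTerm entries).getD b []).foldl (fun s j =>
                    if i ≠ j then PySem.Set.add s (i, j) else s) s) s
              else s) s) (PySem.Set.empty : PySem.Set (Int × Int)) ↔
        (∃ a ∈ (pvByTerm entries).keys, ∃ b ∈ (pvByTerm entries).keys,
          (¬ PySem.Str.find senText (a ++ "-" ++ b) = -1) ∧
          ∃ i ∈ (pvByTerm entries).getD a [], ∃ j ∈ (pvByTerm entries).getD b [], i ≠ j ∧ x = (i, j)) := by
    intro x
    rw [pv_mem_foldl _ (fun a x => ∃ b ∈ (pvByTerm entries).keys,
        (¬ PySem.Str.find senText (a ++ "-" ++ b) = -1) ∧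
        ∃ i ∈ (pvByTerm entries).getD a [], ∃ j ∈ (pvByTerm entries).getD b [], i ≠ j ∧ x = (i, j))
      (fun s a x => hkeyb a s x)]
    simp [PySem.Set.empty]
  unfold pvOk
  rw [pv_mem_foldl _ (fun p x => ∃ j ∈ (pvByStart entries).getD (p.2.2.2 + 1) [], p.1 ≠ j ∧ x = (p.1, j))
      (fun s p x => hadd p.1 _ s x), hok0]
  constructor
  · rintro (⟨p, hp, j, hj, hne, rfl⟩ | ⟨a, _, b, _, hf, i, hi, j, hj, hne, rfl⟩)
    · obtain ⟨q, hq, hqs, rfl⟩ := (pv_mem_bucket_start entries _ j).mp hj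
      exact ⟨p, hp, q, hq, ⟨hne, Or.inr hqs⟩, rfl⟩
    · obtain ⟨p, hp, hpa, rfl⟩ := (pv_mem_bucket_term entries a i).mp hi
      obtain ⟨q, hq, hqb, rfl⟩ := (pv_mem_bucket_term entries b j).mp hj
      refine ⟨p, hp, q, hq, ⟨hne, Or.inl ?_⟩, rfl⟩
      rw [hpa, hqb]; exact hf
  · rintro ⟨p, hp, q, hq, ⟨hne, hcase⟩, rfl⟩
    rcases hcase with hf | hadj
    · refine Or.inr ⟨p.2.1, (pv_mem_keys_term entries _).mpr ⟨p, hp, rfl⟩,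
        q.2.1, (pv_mem_keys_term entries _).mpr ⟨q, hq, rfl⟩, hf,
        p.1, (pv_mem_bucket_term entries _ _).mpr ⟨p, hp, rfl, rfl⟩,
        q.1, (pv_mem_bucket_term entries _ _).mpr ⟨q, hq, rfl, rfl⟩, hne, rfl⟩
    · exact Or.inl ⟨p, hp, q.1, (pv_mem_bucket_start entries _ _).mpr ⟨q, hq, hadj, rfl⟩, hne, rfl⟩

theorem pv_nodup_ok (senText : String) (entries : List (String × Int × Int)) :
    (pvOk senText entries).Nodup := by
  have hadd : ∀ (i : Int) (J : List Int) (s : PySem.Set (Int × Int)), s.Nodup →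
      (J.foldl (fun s j => if i ≠ j then PySem.Set.add s (i, j) else s) s).Nodup := by
    intro i J s hs
    refine pv_nodup_foldl _ ?_ J s hs
    intro s j hsn
    by_cases hij : i ≠ j
    · rw [if_pos hij]; exact PySem.Set.nodup_add s (i, j) hsn
    · rw [if_neg hij]; exact hsn
  unfold pvOk
  refine pv_nodup_foldl _ (fun s p hs => hadd p.1 _ s hs) _ _ ?_
  refine pv_nodup_foldl _ ?_ _ _ (by simp [PySem.Set.empty])
  intro s a hs
  refine pv_nodup_foldl _ ?_ _ _ hs
  intro s b hsn
  by_cases hf : ¬ PySem.Str.find senText (a ++ "-" ++ b) = -1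
  · rw [if_pos hf]
    exact pv_nodup_foldl _ (fun s i hs => hadd i _ s hs) _ _ hsn
  · rw [if_neg hf]; exact hsn

-- membership and strict lexicographic order of the canonical accepted-pair list
theorem pv_mem_canon (senText : String) (entries : List (String × Int × Int)) (x : Int × Int) :
    x ∈ pvCanon senText entries ↔
      ∃ p ∈ PySem.List.enumerate entries, ∃ q ∈ PySem.List.enumerate entries,
        (p.1 ≠ q.1 ∧ (¬ PySem.Str.find senText (p.2.1 ++ "-" ++ q.2.1) = -1 ∨ q.2.2.1 = p.2.2.2 + 1)) ∧ x = (p.1, q.1) := by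
  unfold pvCanon
  simp only [List.mem_flatMap, List.mem_filterMap]
  constructor
  · rintro ⟨p, hp, q, hq, hx⟩
    by_cases hc : (p.1 ≠ q.1 ∧ (¬ PySem.Str.find senText (p.2.1 ++ "-" ++ q.2.1) = -1 ∨ q.2.2.1 = p.2.2.2 + 1))
    · rw [if_pos hc] at hx
      exact ⟨p, hp, q, hq, hc, (Option.some.inj hx).symm⟩
    · rw [if_neg hc] at hx; exact absurd hx (by simp)
  · rintro ⟨p, hp, q, hq, hc, rfl⟩
    exact ⟨p, hp, q, hq, by rw [if_pos hc]⟩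

theorem pv_pairwise_canon (senText : String) (entries : List (String × Int × Int)) :
    (pvCanon senText entries).Pairwise (fun u v => u.1 < v.1 ∨ (u.1 = v.1 ∧ u.2 < v.2)) := by
  unfold pvCanon
  rw [List.pairwise_flatMap]
  constructor
  · intro p _
    rw [List.pairwise_filterMap]
    refine (PySem.List.pairwise_lt_enumerate entries 0).imp ?_
    intro q q' hlt b hb b' hb'
    by_cases hc : (p.1 ≠ q.1 ∧ (¬ PySem.Str.find senText (p.2.1 ++ "-" ++ q.2.1) = -1 ∨ q.2.2.1 = p.2.2.2 + 1))
    · rw [if_pos hc] at hb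
      by_cases hc' : (p.1 ≠ q'.1 ∧ (¬ PySem.Str.find senText (p.2.1 ++ "-" ++ q'.2.1) = -1 ∨ q'.2.2.1 = p.2.2.2 + 1))
      · rw [if_pos hc'] at hb'
        obtain rfl := Option.some.inj hb
        obtain rfl := Option.some.inj hb'
        exact Or.inr ⟨rfl, hlt⟩
      · rw [if_neg hc'] at hb'; exact absurd hb' (by simp)
    · rw [if_neg hc] at hb; exact absurd hb (by simp)
  · refine (PySem.List.pairwise_lt_enumerate entries 0).imp ?_
    intro p p' hlt x hx y hy
    obtain ⟨q, _, hq⟩ := List.mem_filterMap.mp hx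
    obtain ⟨q', _, hq'⟩ := List.mem_filterMap.mp hy
    by_cases hc : (p.1 ≠ q.1 ∧ (¬ PySem.Str.find senText (p.2.1 ++ "-" ++ q.2.1) = -1 ∨ q.2.2.1 = p.2.2.2 + 1))
    · by_cases hc' : (p'.1 ≠ q'.1 ∧ (¬ PySem.Str.find senText (p'.2.1 ++ "-" ++ q'.2.1) = -1 ∨ q'.2.2.1 = p'.2.2.2 + 1))
      · rw [if_pos hc] at hq; rw [if_pos hc'] at hq'
        obtain rfl := Option.some.inj hq
        obtain rfl := Option.some.inj hq'
        exact Or.inl hlt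
      · rw [if_neg hc'] at hq'; exact absurd hq' (by simp)
    · rw [if_neg hc] at hq; exact absurd hq (by simp)

theorem pv_nodup_canon (senText : String) (entries : List (String × Int × Int)) :
    (pvCanon senText entries).Nodup := by
  refine (pv_pairwise_canon senText entries).imp ?_
  intro u v h
  rintro rfl
  rcases h with h | ⟨-, h⟩ <;> omega

-- Python's sort of the pair set: sorted2 with fst/snd keys is insertion by strict lex order
def pvBefore (a b : Int × Int) : Bool := decide (a.1 < b.1) || (!decide (b.1 < a.1) && decide (a.2 < b.2))

theorem pv_sorted2_def (xs : List (Int × Int)) :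
    PySem.List.sorted2 xs (fun ij => ij.1) (fun ij => ij.2) =
      xs.foldl (fun acc x => PySem.List.insertBy pvBefore x acc) [] := rfl

theorem pvBefore_true (a b : Int × Int) :
    pvBefore a b = true ↔ (a.1 < b.1 ∨ (a.1 = b.1 ∧ a.2 < b.2)) := by
  simp only [pvBefore, Bool.or_eq_true, Bool.and_eq_true, Bool.not_eq_eq_eq_not, Bool.not_true,
    decide_eq_true_eq, decide_eq_false_iff_not]
  omega

theorem pvBefore_false (a b : Int × Int) :
    pvBefore a b = false ↔ ¬ (a.1 < b.1 ∨ (a.1 = b.1 ∧ a.2 < b.2)) := by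
  rw [← pvBefore_true a b]
  simp

theorem pv_insertBy_pairwise (x : Int × Int) (acc : List (Int × Int))
    (h : acc.Pairwise (fun u v => pvBefore v u = false)) :
    (PySem.List.insertBy pvBefore x acc).Pairwise (fun u v => pvBefore v u = false) := by
  induction acc with
  | nil => simp [PySem.List.insertBy]
  | cons y ys ih =>
    rw [List.pairwise_cons] at h
    obtain ⟨hy, hys⟩ := h
    rw [PySem.List.insertBy]
    by_cases hxy : pvBefore x y = true
    · rw [if_pos hxy]
      refine List.Pairwise.cons ?_ (List.Pairwise.cons hy hys)
      intro z hz
      rcases List.mem_cons.mp hz with rfl | hz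
      · rw [pvBefore_false]; rw [pvBefore_true] at hxy; omega
      · have hzy := hy z hz
        rw [pvBefore_false] at hzy ⊢
        rw [pvBefore_true] at hxy
        omega
    · rw [if_neg hxy]
      refine List.Pairwise.cons ?_ (ih hys)
      intro z hz
      rcases (PySem.List.mem_insertBy pvBefore x z ys).mp hz with rfl | hz
      · exact Bool.not_eq_true _ ▸ Bool.of_not_eq_true hxy
      · exact hy z hz

theorem pv_foldl_insert_pairwise (L : List (Int × Int)) (acc : List (Int × Int))
    (h : acc.Pairwise (fun u v => pvBefore v u = false)) :
    (L.foldl (fun acc x => PySem.List.insertBy pvBefore x acc) acc).Pairwise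
      (fun u v => pvBefore v u = false) := by
  induction L generalizing acc with
  | nil => exact h
  | cons x L ih => exact ih _ (pv_insertBy_pairwise x acc h)

-- any strictly lex-increasing rearrangement of xs IS sorted(xs) (keys fst then snd)
theorem pv_sorted2_eq (xs ys : List (Int × Int)) (hperm : ys.Perm xs)
    (hpw : ys.Pairwise (fun u v => u.1 < v.1 ∨ (u.1 = v.1 ∧ u.2 < v.2))) :
    PySem.List.sorted2 xs (fun ij => ij.1) (fun ij => ij.2) = ys := by
  have h1 : (PySem.List.sorted2 xs (fun ij => ij.1) (fun ij => ij.2)).Pairwise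
      (fun u v => pvBefore v u = false) := by
    rw [pv_sorted2_def]
    exact pv_foldl_insert_pairwise xs [] (by simp)
  have h2 : ys.Pairwise (fun u v => pvBefore v u = false) := by
    refine hpw.imp ?_
    intro u v h
    rw [pvBefore_false]
    omega
  have h3 : (PySem.List.sorted2 xs (fun ij => ij.1) (fun ij => ij.2)).Perm ys :=
    (PySem.List.sorted2_perm xs _ _ false).trans hperm.symm
  refine List.eq_of_perm_of_sorted ?_ h1 h2 h3
  intro a b _ _ hab hba
  rw [pvBefore_false] at hab hba
  have h4 : a.1 = b.1 ∧ a.2 = b.2 := by omega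
  exact Prod.ext_iff.mpr h4

theorem pv_sorted_ok_eq_canon (senText : String) (entries : List (String × Int × Int)) :
    PySem.List.sorted2 (pvOk senText entries) (fun ij => ij.1) (fun ij => ij.2) =
      pvCanon senText entries := by
  refine pv_sorted2_eq _ _ ?_ (pv_pairwise_canon senText entries)
  rw [List.perm_ext_iff_of_nodup (pv_nodup_canon senText entries) (pv_nodup_ok senText entries)]
  intro x
  rw [pv_mem_canon, pv_mem_ok]

-- B's emitted list is A's flatMap/filterMap of outputs over enumerated pairs
theorem pv_pairsB_eq (senText : String) (entries : List (String × Int × Int)) :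
    pvPairsB senText entries =
      (PySem.List.enumerate entries).flatMap (fun p =>
        (PySem.List.enumerate entries).filterMap (fun q =>
          if (p.1 ≠ q.1 ∧ (¬ PySem.Str.find senText (p.2.1 ++ "-" ++ q.2.1) = -1 ∨ q.2.2.1 = p.2.2.2 + 1)) then some (p.2.1 ++ "-" ++ q.2.1, p.2.2.1, q.2.2.2) else none)) := by
  unfold pvPairsB
  rw [pv_sorted_ok_eq_canon]
  unfold pvCanon
  rw [List.map_flatMap]
  refine List.flatMap_congr ?_
  intro p hp
  rw [List.map_filterMap]
  refine List.filterMap_congr ?_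
  intro q hq
  obtain ⟨k, hk, rfl⟩ := (PySem.List.mem_enumerate_iff entries 0 p).mp hp
  obtain ⟨m, hm, rfl⟩ := (PySem.List.mem_enumerate_iff entries 0 q).mp hq
  by_cases hc : ((0 + (k : Int), entries[k]) : Int × (String × Int × Int)).1 ≠ ((0 + (m : Int), entries[m]) : Int × (String × Int × Int)).1 ∧ (¬ PySem.Str.find senText (((0 + (k : Int), entries[k]) : Int × (String × Int × Int)).2.1 ++ "-" ++ ((0 + (m : Int), entries[m]) : Int × (String × Int × Int)).2.1) = -1 ∨ ((0 + (m : Int), entries[m]) : Int × (String × Int × Int)).2.2.1 = ((0 + (k : Int), entries[k]) : Int × (String × Int × Int)).2.2.2 + 1)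
  · rw [if_pos hc, if_pos hc]
    simp [PySem.List.pyGetD_natCast, List.getD_eq_getElem?_getD, hk, hm]
  · rw [if_neg hc, if_neg hc]
    simp

-- ===== VERDICT (by name: the statement is the Claim_ definition above) =====
theorem extract_site_sequence_spec : Claim_equal_extract_site_sequence := by
  intro tdo senText charStart charEnd typeName typeSeqName _hdom
  unfold Spec_extract_site_sequence extract_site_sequence extract_site_sequence_alt
  cases hget : (PySem.Dict.mk tdo).get? typeName with
  | none => rfl
  | some entries =>
    simp only []
    by_cases hlen : PySem.List.len entries = 1
    · rw [if_pos hlen, if_pos hlen]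
    · rw [if_neg hlen, if_neg hlen]
      simp only [pvPush_eq]
      rw [pv_A_fold_eq_enum senText typeSeqName entries]
      simp only [pv_if_merge]
      rw [pv_outer_fold_empty typeSeqName (fun _ => PySem.List.enumerate entries)
        (fun (p q : Int × (String × Int × Int)) => (p.1 ≠ q.1 ∧ (¬ PySem.Str.find senText (p.2.1 ++ "-" ++ q.2.1) = -1 ∨ q.2.2.1 = p.2.2.2 + 1)))
        (fun (p q : Int × (String × Int × Int)) => (p.2.1 ++ "-" ++ q.2.1, p.2.2.1, q.2.2.2))]
      rw [pv_pairsB_eq]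
      split_ifs <;> rfl
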